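-- pv_equiv track=rewrite | github.com/Abhay-Kanwasi/Learning-Python | String/dsa.py | encrypt_the_string
-- ===== SOURCE A (Python) =====
-- def encrypt_the_string(string):
--     storage = {}
--     for character in string:
--         if character in storage:
--             storage[character] += 1
--         else:
--             storage[character] = 1
--     output = "".join(
--         f"{character}{hex(count)[2:]}" for character, count in storage.items()
--     )
--     return output[::-1]
-- ===== SOURCE B (Python) =====
-- def encrypt_the_string(string):
--     if not string:
--         return ""
--     c = string[0]
--     rest = "".join(ch for ch in string if ch != c)
--     n = len(string) - len(rest)
--     digits = ""
--     while True:
--         digits += "0123456789abcdef"[n % 16]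
--         n //= 16
--         if n == 0:
--             break
--     return encrypt_the_string(rest) + digits + c
-- ===== Notes on version B (the rewrite author's own statement) =====
-- stated objective: alternative
-- what changed: Replaces A's counting-dict pass + hex() formatting + final [::-1] with a recursion that partitions the string on its first character (strip all its occurrences, count by length difference), emits hex digits least-significant-first via a manual divmod-16 loop, and so builds the reversed output directly with no dict, no hex() and no final reversal.
import Mathlib
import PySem

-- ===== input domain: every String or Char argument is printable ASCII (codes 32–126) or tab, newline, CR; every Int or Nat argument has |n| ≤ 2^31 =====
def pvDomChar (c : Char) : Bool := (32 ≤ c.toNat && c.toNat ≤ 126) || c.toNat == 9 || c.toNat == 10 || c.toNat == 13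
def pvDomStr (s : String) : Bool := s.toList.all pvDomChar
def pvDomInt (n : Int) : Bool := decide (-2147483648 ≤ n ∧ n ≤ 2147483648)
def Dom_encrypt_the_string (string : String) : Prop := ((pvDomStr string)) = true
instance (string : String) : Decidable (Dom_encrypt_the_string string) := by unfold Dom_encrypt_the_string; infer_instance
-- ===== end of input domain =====

-- B replaces A's counting-dict pass + hex() + final [::-1] by a recursive partition: take the first
-- character, strip all its occurrences, recurse, and emit hex digits least-significant-first so the
-- reversed output is built directly (alternative decomposition, not claimed faster).

-- ===== PORT A =====
-- A-side helper: the hex digit for 0 ≤ n < 16, as Python's lowercase hex uses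
def pyHexDigit (n : Nat) : Char := if n < 10 then Char.ofNat (48 + n) else Char.ofNat (87 + n)

-- A-side helper: hex(n)[2:] for a nonnegative count n (A calls exactly hex(count)[2:]); exact for n ≥ 0
def pyHexDigits (n : Nat) : List Char :=
  if _h : n < 16 then [pyHexDigit n]
  else pyHexDigits (n / 16) ++ [pyHexDigit (n % 16)]
decreasing_by exact Nat.div_lt_self (by omega) (by omega)

-- counts are positive Ints; hex(count)[2:] is ported via pyHexDigits count.toNat;
-- "".join of the pieces is their concatenation (flatten); output[::-1] is reverse
def encrypt_the_string (string : String) : String :=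
  let storage : PySem.Dict Char Int :=
    string.toList.foldl
      (fun d character =>
        if d.contains character then d.insert character (d.getD character 0 + 1)
        else d.insert character 1)
      PySem.Dict.empty
  let output : List Char :=
    (storage.items.map (fun p => p.1 :: pyHexDigits p.2.toNat)).flatten
  String.ofList output.reverse

-- ===== PORT B =====
-- B-side helper: "0123456789abcdef"[k], exact for the 0 ≤ k < 16 indices B uses
def altHexTable (k : Nat) : Char := ("0123456789abcdef".toList).getD k ' '

-- B-side helper: the do-while loop accumulating digits ("digits += table[n % 16]; n //= 16; stop when n == 0");
-- n is a nonnegative Python int, so Nat % and / are exact here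
def altDigits (n : Nat) (digits : List Char) : List Char :=
  let digits := digits ++ [altHexTable (n % 16)]
  if _h : n / 16 = 0 then digits else altDigits (n / 16) digits
decreasing_by exact Nat.div_lt_self (by omega) (by omega)

-- B-side helper: the recursion; rest = the chars of string that differ from its first char,
-- n = len(string) - len(rest) (nonnegative, so Nat subtraction is exact)
def altGo (s : List Char) : List Char :=
  match s with
  | [] => []
  | c :: t =>
    let rest := (c :: t).filter (fun ch => ch ≠ c)
    let n := (c :: t).length - rest.length
    altGo rest ++ altDigits n [] ++ [c]
termination_by s.length
decreasing_by
  simp only [List.filter_cons, ne_eq, not_true_eq_false, decide_false,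
    List.length_cons]
  exact Nat.lt_succ_of_le (List.length_filter_le _ t)

def encrypt_the_string_alt (string : String) : String :=
  String.ofList (altGo string.toList)

-- ===== PRECONDITION & SPEC =====
def Spec_encrypt_the_string (string : String) (out : String) : Prop := out = encrypt_the_string_alt string
instance (string : String) (out : String) : Decidable (Spec_encrypt_the_string string out) := by unfold Spec_encrypt_the_string; infer_instance

-- ===== CLAIM =====
def Claim_equal_encrypt_the_string : Prop := ∀ (string : String), Dom_encrypt_the_string string → Spec_encrypt_the_string string (encrypt_the_string string)

-- ===== LEMMAS AND PROOFS =====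

-- A's loop body equals the counter step (when the key is absent, getD is 0 anyway)
theorem a_foldl_eq_counter (xs : List Char) :
    xs.foldl
      (fun d character =>
        if d.contains character then d.insert character (d.getD character 0 + 1)
        else d.insert character 1)
      PySem.Dict.empty = PySem.Dict.counter xs := by
  rw [List.foldl_ext (g := fun d x => d.insert x (d.getD x 0 + 1))]
  · exact PySem.Dict.foldl_insert_getD_add_one_eq_counter xs
  · intro d x _
    by_cases h : d.contains x
    · simp [h]
    · simp only [Bool.not_eq_true] at h
      simp [h, PySem.Dict.getD, (PySem.Dict.get?_eq_none_iff_contains d x).mpr h]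

theorem altHexTable_eq (k : Nat) (hk : k < 16) : altHexTable k = pyHexDigit k := by
  interval_cases k <;> rfl

-- B's digit loop produces exactly hex(n)[2:] reversed, appended to the accumulator
theorem altDigits_eq (n : Nat) (acc : List Char) :
    altDigits n acc = acc ++ (pyHexDigits n).reverse := by
  induction n using Nat.strong_induction_on generalizing acc with
  | _ n ih =>
    rw [altDigits, pyHexDigits]
    by_cases h : n / 16 = 0
    · have h16 : n < 16 := Nat.lt_of_div_eq_zero (by omega) h
      simp [h, h16, Nat.mod_eq_of_lt h16, altHexTable_eq n h16]
    · have h16 : ¬ n < 16 := fun hlt => h (Nat.div_eq_of_lt hlt)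
      simp [h, h16, ih (n / 16) (Nat.div_lt_self (by omega) (by omega)),
        altHexTable_eq _ (Nat.mod_lt _ (by omega))]

-- removing every copy of the head and counting what was removed: n = count of the head
theorem length_sub_filter (c : Char) (t : List Char) :
    (c :: t).length - ((c :: t).filter (fun ch => ch ≠ c)).length = (c :: t).count c := by
  induction t with
  | nil => simp
  | cons x xs ih =>
    by_cases hx : x = c
    · subst hx
      simp only [List.filter, List.length_cons, List.count_cons] at *
      simp_all
      omega
    · have h1 : ((c :: x :: xs).filter (fun ch => ch ≠ c)).length
          = ((c :: xs).filter (fun ch => ch ≠ c)).length + 1 := by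
        simp [List.filter, hx]
      have h2 : (c :: x :: xs).count c = (c :: xs).count c := by
        simp [hx]
      have h3 : ((c :: xs).filter (fun ch => ch ≠ c)).length ≤ (c :: xs).length :=
        List.length_filter_le _ _
      simp only [List.length_cons] at *
      omega

-- ordered dedup peels off the head and everything equal to it
theorem set_add_mem (acc : List Char) (x : Char) (h : acc.contains x = true) :
    PySem.Set.add acc x = acc := by
  simp [PySem.Set.add, List.contains_iff_mem.mp h]

theorem set_foldl_contains (acc : List Char) (xs : List Char) (c : Char)
    (h : acc.contains c = true) :
    List.foldl PySem.Set.add acc xs = List.foldl PySem.Set.add acc (xs.filter (fun ch => ch ≠ c)) := by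
  induction xs generalizing acc with
  | nil => rfl
  | cons x t ih =>
    simp only [List.foldl_cons, List.filter_cons]
    by_cases hx : x = c
    · subst hx
      simp only [ne_eq, not_true_eq_false, decide_false]
      rw [set_add_mem acc x h]
      exact ih acc h
    · simp only [ne_eq, hx, not_false_eq_true, decide_true, if_true, List.foldl_cons]
      refine ih (PySem.Set.add acc x) ?_
      unfold PySem.Set.add
      split
      · exact h
      · simp only [List.contains_append, h, Bool.true_or]

theorem set_foldl_cons_notmem (c : Char) (acc : List Char) (xs : List Char)
    (h : ∀ y ∈ xs, y ≠ c) :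
    List.foldl PySem.Set.add (c :: acc) xs = c :: List.foldl PySem.Set.add acc xs := by
  induction xs generalizing acc with
  | nil => rfl
  | cons x t ih =>
    have hx : x ≠ c := h x (List.mem_cons_self ..)
    have hstep : PySem.Set.add (c :: acc) x = c :: PySem.Set.add acc x := by
      unfold PySem.Set.add
      have hcx : PySem.Set.contains (c :: acc) x = PySem.Set.contains acc x := by
        unfold PySem.Set.contains
        rw [List.contains_cons, beq_eq_false_iff_ne.mpr hx, Bool.false_or]
      rw [hcx]
      split <;> simp
    simp only [List.foldl_cons, hstep]
    exact ih (PySem.Set.add acc x) (fun y hy => h y (List.mem_cons_of_mem _ hy))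

theorem dedup_cons (c : Char) (t : List Char) :
    PySem.List.dedup (c :: t) = c :: PySem.List.dedup (t.filter (fun ch => ch ≠ c)) := by
  unfold PySem.List.dedup PySem.Set.ofList
  have hempty : PySem.Set.add PySem.Set.empty c = [c] := by
    simp [PySem.Set.add, PySem.Set.empty]
  simp only [List.foldl_cons, hempty]
  rw [set_foldl_contains [c] t c (by simp)]
  rw [set_foldl_cons_notmem c [] _ (fun y hy => by
    simp only [List.mem_filter, ne_eq, decide_eq_true_eq] at hy
    exact hy.2)]
  rfl

-- the heart of the proof: B's recursion computes the reverse of A's joined items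
theorem altGo_eq (s : List Char) :
    altGo s = (((PySem.List.dedup s).map (fun c => c :: pyHexDigits (s.count c))).flatten).reverse := by
  induction s using altGo.induct with
  | case1 => simp [altGo]
  | case2 c t rest ih =>
    rw [altGo]
    have hrest : (c :: t).filter (fun ch => ch ≠ c) = t.filter (fun ch => ch ≠ c) := by
      simp
    simp only [rest, hrest] at ih
    rw [hrest, ih, altDigits_eq]
    have hn : (c :: t).length - (t.filter (fun ch => ch ≠ c)).length = (c :: t).count c := by
      have := length_sub_filter c t
      rwa [hrest] at this
    rw [hn, dedup_cons]
    have hmap : (PySem.List.dedup (t.filter (fun ch => ch ≠ c))).map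
          (fun d => d :: pyHexDigits ((c :: t).count d))
        = (PySem.List.dedup (t.filter (fun ch => ch ≠ c))).map
          (fun d => d :: pyHexDigits ((t.filter (fun ch => ch ≠ c)).count d)) := by
      refine List.map_congr_left fun d hd => ?_
      rw [PySem.List.dedup_eq_ofList, PySem.Set.mem_ofList] at hd
      have hdc : d ≠ c := by
        simp only [List.mem_filter, ne_eq, decide_eq_true_eq] at hd
        exact hd.2
      have h1 : (c :: t).count d = t.count d := by
        simp [Ne.symm hdc]
      have h2 : (t.filter (fun ch => ch ≠ c)).count d = t.count d := by
        rw [List.count_filter]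
        simp [hdc]
      rw [h1, h2]
    simp only [List.map_cons, List.flatten_cons, List.reverse_append, List.reverse_cons,
      hmap]
    simp

-- ===== VERDICT =====
theorem encrypt_the_string_spec : Claim_equal_encrypt_the_string := by
  intro string _
  unfold Spec_encrypt_the_string encrypt_the_string encrypt_the_string_alt
  simp only [a_foldl_eq_counter, PySem.Dict.items_counter, List.map_map, altGo_eq]
  rw [PySem.List.dedup_eq_ofList]
  simp [Function.comp_def]
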